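-- pv_equiv track=rewrite | github.com/kingkingyyk/RPiDrive | backend/drive/core/local_file_object.py | generate_new_file_name
-- ===== SOURCE A (Python) =====
-- def generate_new_file_name(name, used_names):
--     """Search for a filename that is not being used yet"""
--     for i in range(1, 100000):
--         name_split = name.split('.')
--         name_split[-2 if len(name_split) > 1 else -1] += f' ({i})'
--         new_name = '.'.join(name_split)
--         if new_name not in used_names:
--             return new_name
--     raise Exception('Filename generation run out of index!')
-- ===== SOURCE B (Python) =====
-- def generate_new_file_name(name, used_names):
--     """Search for a filename that is not being used yet"""
--     parts = name.split('.')
--     if len(parts) > 1: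
--         head = '.'.join(parts[:-1]) + ' ('
--         tail = ').' + parts[-1]
--     else:
--         head = parts[0] + ' ('
--         tail = ')'
--     n, m = len(head), len(tail)
--     mids = set()
--     for u in used_names:
--         if len(u) > n + m and u.startswith(head) and u.endswith(tail):
--             mids.add(u[n:len(u) - m])
--     for i in range(1, 100000):
--         if str(i) not in mids:
--             return head + str(i) + tail
--     raise Exception('Filename generation run out of index!')
-- ===== Notes on version B (the rewrite author's own statement) =====
-- stated objective: alternative
-- what changed: Instead of rebuilding the candidate name and probing the used_names list for every index, B splits the name once into a fixed head/tail around the numeric middle, makes one pass over used_names collecting the middles of entries that exactly match the candidate shape into a set, and then returns the first index whose string form is not in that set.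
import Mathlib
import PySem

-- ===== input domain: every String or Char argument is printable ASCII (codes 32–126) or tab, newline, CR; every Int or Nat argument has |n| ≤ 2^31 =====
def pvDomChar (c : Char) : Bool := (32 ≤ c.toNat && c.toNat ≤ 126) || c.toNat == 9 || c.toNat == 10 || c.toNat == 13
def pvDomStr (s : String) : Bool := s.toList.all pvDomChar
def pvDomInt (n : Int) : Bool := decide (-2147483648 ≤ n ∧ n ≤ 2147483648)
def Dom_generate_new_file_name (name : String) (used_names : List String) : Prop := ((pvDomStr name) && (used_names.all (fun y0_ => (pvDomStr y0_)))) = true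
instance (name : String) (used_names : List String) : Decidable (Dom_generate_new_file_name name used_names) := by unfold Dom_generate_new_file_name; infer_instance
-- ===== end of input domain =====

-- B re-implements the search by splitting the name once, indexing used_names into the set of
-- numeric middles that match the candidate shape, then scanning i = 1.. for a free index
-- (objective: alternative decomposition; same observable behaviour, including raising at the
-- same inputs — the common unreachable 'raise' branch is modelled as "" in both ports).

-- ===== PORT A =====
-- loop body: rebuild the candidate name for index i and return it if unused
def pvCand (name : String) (i : Int) : String :=
  let name_split := (PySem.Str.split? name ".").getD []   -- sep "." is nonempty, so split? is `some`
  -- name_split[-2 if len(name_split) > 1 else -1]: split never returns [], so the negative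
  -- indices -2 / -1 are exactly the indices length-2 / length-1
  let j : Nat := if name_split.length > 1 then name_split.length - 2 else name_split.length - 1
  PySem.Str.join "." (name_split.set j (name_split.getD j "" ++ " (" ++ PySem.Int.toStr i ++ ")"))

def pvALoop (name : String) (used_names : List String) : List Int → String
  | [] => ""          -- raise Exception('Filename generation run out of index!') — B raises at exactly the same inputs
  | i :: is =>
    let new_name := pvCand name i
    if new_name ∉ used_names then new_name else pvALoop name used_names is

def generate_new_file_name (name : String) (used_names : List String) : String :=
  pvALoop name used_names (PySem.List.pyRange 1 100000)

-- ===== PORT B =====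
-- head/tail around the numeric middle: candidate(i) = head ++ str(i) ++ tail
def pvHeadTail (parts : List String) : String × String :=
  if parts.length > 1 then
    (PySem.Str.join "." (PySem.List.slice parts none (some (-1))) ++ " (", ")." ++ parts.getLastD "")
  else
    (parts.headD "" ++ " (", ")")      -- parts[0]: split never returns []

def pvBLoop (head tail : String) (mids : PySem.Set String) : List Int → String
  | [] => ""          -- raise Exception('Filename generation run out of index!')
  | i :: is =>
    if !PySem.Set.contains mids (PySem.Int.toStr i) then head ++ PySem.Int.toStr i ++ tail
    else pvBLoop head tail mids is

def generate_new_file_name_alt (name : String) (used_names : List String) : String :=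
  let ht := pvHeadTail ((PySem.Str.split? name ".").getD [])
  let mids : PySem.Set String := used_names.foldl (fun s u =>
      if decide (PySem.Str.len ht.1 + PySem.Str.len ht.2 < PySem.Str.len u)
          && PySem.Str.startswith u ht.1 && PySem.Str.endswith u ht.2
      then PySem.Set.add s (PySem.Str.slice u (some (PySem.Str.len ht.1)) (some (PySem.Str.len u - PySem.Str.len ht.2)))
      else s) PySem.Set.empty
  pvBLoop ht.1 ht.2 mids (PySem.List.pyRange 1 100000)

-- ===== PRECONDITION & SPEC =====
def Spec_generate_new_file_name (name : String) (used_names : List String) (out : String) : Prop := out = generate_new_file_name_alt name used_names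
instance (name : String) (used_names : List String) (out : String) : Decidable (Spec_generate_new_file_name name used_names out) := by unfold Spec_generate_new_file_name; infer_instance

-- ===== CLAIM (what is proved, stated in full; the proofs are below) =====
def Claim_equal_generate_new_file_name : Prop := ∀ (name : String) (used_names : List String), Dom_generate_new_file_name name used_names → Spec_generate_new_file_name name used_names (generate_new_file_name name used_names)

-- ===== LEMMAS AND PROOFS =====

-- str.split never returns an empty list
lemma pv_go_ne_nil (sep : List Char) : ∀ (fuel : Nat) (l cur : List Char) (acc : List (List Char)),
    PySem.Chars.splitOn.go sep fuel l cur acc ≠ [] := by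
  intro fuel
  induction fuel with
  | zero => intro l cur acc; simp [PySem.Chars.splitOn.go]
  | succ n ih =>
    intro l cur acc
    cases l with
    | nil => simp [PySem.Chars.splitOn.go]
    | cons c rest =>
      rw [PySem.Chars.splitOn.go]
      split
      · exact ih _ _ _
      · exact ih _ _ _

lemma pv_split_ne_nil (name : String) : (PySem.Str.split? name ".").getD [] ≠ [] := by
  have h := PySem.Str.split?_map name "."
  cases e : PySem.Str.split? name "." with
  | none =>
    rw [e] at h
    simp [PySem.Chars.split?, PySem.Chars.splitOn] at h
  | some ps =>
    rw [e] at h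
    simp only [Option.map_some, PySem.Chars.split?] at h
    rw [if_neg (by simp)] at h
    simp only [Option.some_inj] at h
    intro hnil
    simp only [Option.getD_some] at hnil
    subst hnil
    exact pv_go_ne_nil _ _ _ _ _ (by simpa using h.symm)

-- join lemmas on the char level
lemma pv_cjoin_snoc_append (sep : List Char) (l : List (List Char)) (a s : List Char) :
    PySem.Chars.join sep (l ++ [a ++ s]) = PySem.Chars.join sep (l ++ [a]) ++ s := by
  induction l with
  | nil => simp [PySem.Chars.join_singleton]
  | cons c l ih =>
    cases l with
    | nil => simp [PySem.Chars.join_cons_cons, PySem.Chars.join_singleton]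
    | cons d l =>
      simp only [List.cons_append, PySem.Chars.join_cons_cons] at *
      simp [ih, List.append_assoc]

lemma pv_cjoin_snoc2 (sep : List Char) (l : List (List Char)) (a b : List Char) :
    PySem.Chars.join sep (l ++ [a, b]) = PySem.Chars.join sep (l ++ [a]) ++ sep ++ b := by
  induction l with
  | nil => simp [PySem.Chars.join_cons_cons, PySem.Chars.join_singleton]
  | cons c l ih =>
    cases l with
    | nil =>
      simp [PySem.Chars.join_cons_cons, PySem.Chars.join_singleton, List.append_assoc]
    | cons d l =>
      simp only [List.cons_append, PySem.Chars.join_cons_cons] at *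
      simp [ih, List.append_assoc]

lemma pv_exists_snoc2 (p : List String) (h : 2 ≤ p.length) : ∃ l x y, p = l ++ [x, y] := by
  rcases p.eq_nil_or_concat with rfl | ⟨q, y, rfl⟩
  · simp at h
  · rcases q.eq_nil_or_concat with rfl | ⟨l, x, rfl⟩
    · simp at h
    · exact ⟨l, x, y, by simp⟩

-- A's candidate equals head ++ w ++ tail
lemma pv_cand_core (parts : List String) (hne : parts ≠ []) (w : String) :
    PySem.Str.join "." (parts.set (if parts.length > 1 then parts.length - 2 else parts.length - 1)
      (parts.getD (if parts.length > 1 then parts.length - 2 else parts.length - 1) "" ++ " (" ++ w ++ ")"))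
    = (pvHeadTail parts).1 ++ w ++ (pvHeadTail parts).2 := by
  by_cases h2 : 2 ≤ parts.length
  · obtain ⟨l, x, y, rfl⟩ := pv_exists_snoc2 parts h2
    have hlen : (l ++ [x, y]).length = l.length + 2 := by simp
    rw [pvHeadTail, if_pos (by simp [hlen])]
    rw [if_pos (by omega), PySem.List.slice_to_neg_one]
    simp only [hlen, Nat.add_sub_cancel]
    have hgd : (l ++ [x, y]).getD l.length "" = x := by simp
    have hset : (l ++ [x, y]).set l.length (x ++ " (" ++ w ++ ")") = l ++ [x ++ " (" ++ w ++ ")", y] := by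
      simp
    have hdl : (l ++ [x, y]).dropLast = l ++ [x] := by simp
    have hgl : (l ++ [x, y]).getLastD "" = y := by simp
    rw [hgd, hset, hdl, hgl]
    apply String.toList_inj.mp
    simp only [PySem.Str.toList_join, List.map_append, List.map_cons, List.map_nil,
      String.toList_append]
    rw [pv_cjoin_snoc2]
    simp only [List.append_assoc]
    rw [pv_cjoin_snoc_append ("." : String).toList (l.map String.toList) x.toList]
    simp [List.append_assoc]
  · have h1 : parts.length = 1 := by
      rcases parts with _ | ⟨x, _ | _⟩ <;> simp_all
    rcases parts with _ | ⟨x, rest⟩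
    · simp at hne
    · have : rest = [] := by simpa using h1
      subst this
      rw [pvHeadTail, if_neg (by simp)]
      rw [if_neg (by simp)]
      apply String.toList_inj.mp
      simp [PySem.Str.toList_join, PySem.Chars.join_singleton, List.append_assoc]

lemma pv_cand_eq (name : String) (i : Int) :
    pvCand name i
    = (pvHeadTail ((PySem.Str.split? name ".").getD [])).1 ++ PySem.Int.toStr i
      ++ (pvHeadTail ((PySem.Str.split? name ".").getD [])).2 := by
  rw [pvCand]
  exact pv_cand_core _ (pv_split_ne_nil name) _

lemma pv_toStr_ne_empty (i : Int) : PySem.Int.toStr i ≠ "" := by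
  intro h
  have h2 : (PySem.Int.toStr i).toList = [] := by rw [h]; rfl
  rw [PySem.Int.toList_toStr, PySem.Int.toChars] at h2
  split at h2
  · simp at h2
  · have h3 : 0 < (Nat.toDigits 10 i.toNat).length := Nat.length_toDigits_pos
    rw [h2] at h3
    simp at h3

lemma pv_split3 (cs : List Char) (n k : Nat) :
    cs = cs.take n ++ (cs.drop n).take k ++ cs.drop (n + k) := by
  have h1 : cs.drop (n + k) = (cs.drop n).drop k := by
    rw [List.drop_drop, Nat.add_comm]
  rw [h1, List.append_assoc, List.take_append_drop, List.take_append_drop]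

-- shape condition ↔ u has the candidate form
lemma pv_cond_iff (head tail u : String) :
    (PySem.Str.len head + PySem.Str.len tail < PySem.Str.len u
      ∧ PySem.Str.startswith u head = true ∧ PySem.Str.endswith u tail = true)
    ↔ ∃ w : String, w ≠ "" ∧ u = head ++ w ++ tail := by
  constructor
  · rintro ⟨hl, hs, he⟩
    simp only [PySem.Str.len_eq] at hl
    have hl' : head.toList.length + tail.toList.length < u.toList.length := by exact_mod_cast hl
    rw [PySem.Str.startswith_eq, PySem.Chars.startswith_iff] at hs
    rw [PySem.Str.endswith_eq, PySem.Chars.endswith_iff] at he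
    set n := head.toList.length with hn
    set m := tail.toList.length with hm
    have hhead : head.toList = u.toList.take n := List.prefix_iff_eq_take.mp hs
    have htail : tail.toList = u.toList.drop (u.toList.length - m) := by
      have := List.suffix_iff_eq_drop.mp he
      simpa [hm] using this
    refine ⟨String.ofList ((u.toList.drop n).take (u.toList.length - m - n)), ?_, ?_⟩
    · intro hw
      have hz : (u.toList.drop n).take (u.toList.length - m - n) = [] := by
        have h4 := congrArg String.toList hw
        rwa [String.toList_ofList] at h4
      have hz' : ((u.toList.drop n).take (u.toList.length - m - n)).length = 0 := by rw [hz]; rfl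
      rw [List.length_take, List.length_drop] at hz'
      omega
    · apply String.toList_inj.mp
      simp only [String.toList_append, String.toList_ofList]
      rw [hhead, htail]
      have hnk : n + (u.toList.length - m - n) = u.toList.length - m := by omega
      have hd : u.toList.drop (u.toList.length - m) = u.toList.drop (n + (u.toList.length - m - n)) :=
        congrArg u.toList.drop hnk.symm
      rw [hd]
      exact pv_split3 u.toList n _
  · rintro ⟨w, hw, rfl⟩
    have hwl : w.toList ≠ [] := by
      intro hnil; exact hw (String.toList_inj.mp (by simpa using hnil))
    have hwlen : 1 ≤ w.toList.length := by
      cases h : w.toList with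
      | nil => exact absurd h hwl
      | cons a b => simp
    refine ⟨?_, ?_, ?_⟩
    · simp only [PySem.Str.len_eq, String.toList_append, List.length_append]
      have := hwlen
      push_cast
      omega
    · rw [PySem.Str.startswith_eq, PySem.Chars.startswith_iff]
      simp only [String.toList_append]
      exact (List.prefix_append _ _).trans (by rw [List.append_assoc])
    · rw [PySem.Str.endswith_eq, PySem.Chars.endswith_iff]
      simp only [String.toList_append]
      exact List.suffix_append _ _

-- the slice u[len(head) : len(u)-len(tail)] recovers the middle
lemma pv_extract_concat (head w tail : String) :
    PySem.Str.slice (head ++ w ++ tail) (some (PySem.Str.len head))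
      (some (PySem.Str.len (head ++ w ++ tail) - PySem.Str.len tail)) = w := by
  apply String.toList_inj.mp
  have hb : PySem.Str.len (head ++ w ++ tail) - PySem.Str.len tail
      = ((head.toList.length + w.toList.length : Nat) : Int) := by
    simp only [PySem.Str.len_eq, String.toList_append, List.length_append]
    push_cast
    ring
  rw [PySem.Str.toList_slice, PySem.Chars.slice_eq_listSlice, hb, PySem.Str.len_eq]
  have := PySem.List.slice_natCast ((head ++ w ++ tail)).toList head.toList.length
      (head.toList.length + w.toList.length)
  rw [this]
  simp only [String.toList_append, Nat.add_sub_cancel_left]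
  rw [List.append_assoc, List.drop_left, List.take_left]

-- membership in the fold that builds `mids`
lemma pv_mem_foldl_filter_add (c : String → Bool) (f : String → String) :
    ∀ (l : List String) (s : PySem.Set String) (x : String),
      x ∈ l.foldl (fun s u => if c u then PySem.Set.add s (f u) else s) s
      ↔ x ∈ s ∨ ∃ u ∈ l, c u = true ∧ f u = x := by
  intro l
  induction l with
  | nil => intro s x; simp
  | cons u l ih =>
    intro s x
    simp only [List.foldl_cons]
    cases hc : c u
    · simp only [Bool.false_eq_true, if_false, ih]
      constructor
      · rintro (h | h)
        · exact Or.inl h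
        · exact Or.inr (by rcases h with ⟨v, hv, h1, h2⟩; exact ⟨v, List.mem_cons_of_mem _ hv, h1, h2⟩)
      · rintro (h | ⟨v, hv, h1, h2⟩)
        · exact Or.inl h
        · rcases List.mem_cons.mp hv with rfl | hv'
          · rw [hc] at h1; simp at h1
          · exact Or.inr ⟨v, hv', h1, h2⟩
    · simp only [if_true, ih, PySem.Set.mem_add]
      constructor
      · rintro (h | h)
        · rcases h with h | h
          · exact Or.inl h
          · exact Or.inr ⟨u, List.mem_cons_self, hc, h.symm⟩
        · exact Or.inr (by rcases h with ⟨v, hv, h1, h2⟩; exact ⟨v, List.mem_cons_of_mem _ hv, h1, h2⟩)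
      · rintro (h | ⟨v, hv, h1, h2⟩)
        · exact Or.inl (Or.inl h)
        · rcases List.mem_cons.mp hv with rfl | hv'
          · exact Or.inl (Or.inr h2.symm)
          · exact Or.inr ⟨v, hv', h1, h2⟩

-- the built set contains str(i) exactly when candidate(i) is used
lemma pv_mids_mem_iff (head tail : String) (used : List String) (x : String) (hx : x ≠ "") :
    x ∈ used.foldl (fun s u =>
        if decide (PySem.Str.len head + PySem.Str.len tail < PySem.Str.len u)
            && PySem.Str.startswith u head && PySem.Str.endswith u tail
        then PySem.Set.add s (PySem.Str.slice u (some (PySem.Str.len head)) (some (PySem.Str.len u - PySem.Str.len tail)))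
        else s) PySem.Set.empty
    ↔ (head ++ x ++ tail) ∈ used := by
  rw [pv_mem_foldl_filter_add
    (fun u => decide (PySem.Str.len head + PySem.Str.len tail < PySem.Str.len u)
        && PySem.Str.startswith u head && PySem.Str.endswith u tail)
    (fun u => PySem.Str.slice u (some (PySem.Str.len head)) (some (PySem.Str.len u - PySem.Str.len tail)))]
  simp only [PySem.Set.empty, List.not_mem_nil, false_or]
  constructor
  · rintro ⟨u, hu, hcond, hex⟩
    simp only [Bool.and_eq_true, decide_eq_true_eq] at hcond
    obtain ⟨w, hw, rfl⟩ := (pv_cond_iff head tail u).mp ⟨hcond.1.1, hcond.1.2, hcond.2⟩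
    rw [pv_extract_concat] at hex
    subst hex
    exact hu
  · intro hu
    refine ⟨head ++ x ++ tail, hu, ?_, ?_⟩
    · have := (pv_cond_iff head tail (head ++ x ++ tail)).mpr ⟨x, hx, rfl⟩
      simp only [Bool.and_eq_true, decide_eq_true_eq]
      exact ⟨⟨this.1, this.2.1⟩, this.2.2⟩
    · exact pv_extract_concat head x tail

-- the two scans agree step by step
lemma pv_loop_eq (name : String) (used : List String) (head tail : String) (mids : PySem.Set String)
    (hc : ∀ i : Int, pvCand name i = head ++ PySem.Int.toStr i ++ tail)
    (hm : ∀ i : Int, PySem.Int.toStr i ∈ mids ↔ (head ++ PySem.Int.toStr i ++ tail) ∈ used) :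
    ∀ is : List Int, pvALoop name used is = pvBLoop head tail mids is := by
  intro is
  induction is with
  | nil => rfl
  | cons i is ih =>
    rw [pvALoop, pvBLoop]
    by_cases h : (head ++ PySem.Int.toStr i ++ tail) ∈ used
    · have hmem : PySem.Set.contains mids (PySem.Int.toStr i) = true :=
        (PySem.Set.contains_iff _ _).mpr ((hm i).mpr h)
      rw [hc i, if_neg (by simpa using h), hmem]
      simpa using ih
    · have hmem : PySem.Set.contains mids (PySem.Int.toStr i) = false := by
        rw [← Bool.not_eq_true, PySem.Set.contains_iff]
        exact fun hx => h ((hm i).mp hx)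
      rw [hc i, if_pos (by simpa using h), hmem]
      rfl

-- ===== VERDICT (by name: the statement is the Claim_ definition above) =====
theorem generate_new_file_name_spec : Claim_equal_generate_new_file_name := by
  unfold Claim_equal_generate_new_file_name
  intro name used _
  unfold Spec_generate_new_file_name
  unfold generate_new_file_name generate_new_file_name_alt
  exact pv_loop_eq name used _ _ _
    (fun i => pv_cand_eq name i)
    (fun i => pv_mids_mem_iff _ _ used (PySem.Int.toStr i) (pv_toStr_ne_empty i))
    (PySem.List.pyRange 1 100000)
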